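-- pv_equiv track=rewrite | github.com/boyu0906/FUNFUN | directory_path_normalization.py | shortest_equivalent_path
-- ===== SOURCE A (Python) =====
-- def shortest_equivalent_path(path):
--     if not path:
--         raise ValueError('Invalid path')
--     result = []
--     if path[0] == '/':
--         result.append('/')
--     for token in (token for token in path.split('/') if token not in ['', '.']):
--         if token == '..':
--             if not result or result[-1] == '..':    ## '../../a/b/c'
--                 result.append(token)
--             else:
--                 if result[-1] == '/':               ## '/a/../../../b'
--                     raise ValueError('Invalid path')
--                 else:
--                     result.pop()
--         else:
--             result.append(token)
--     final_path = '/'.join(result)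
--     return final_path[final_path.startswith('//'):]
-- ===== SOURCE B (Python) =====
-- def shortest_equivalent_path(path):
--     if not path:
--         raise ValueError('Invalid path')
--     is_absolute = path.startswith('/')
--     skip = 0        # '..' segments seen (to the right) not yet cancelled
--     out = []        # kept components, collected right-to-left
--     for token in reversed(path.split('/')):
--         if token in ('', '.'):
--             continue
--         if token == '..':
--             skip += 1
--         elif skip:
--             skip -= 1
--         else:
--             out.append(token)
--     if skip:
--         if is_absolute:
--             raise ValueError('Invalid path')
--         out.extend(['..'] * skip)
--     out.reverse()
--     return '/' + '/'.join(out) if is_absolute else '/'.join(out)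
-- ===== Notes on version B (the rewrite author's own statement) =====
-- stated objective: alternative
-- what changed: B replaces A's forward stack (push components, pop on '..', '/' sentinel, final '//'-slice) by a right-to-left scan with a skip counter: each '..' increments skip, a real component is dropped while skip>0 (never pushed and popped), kept components are collected back-to-front and reversed once at the end; residual skip becomes leading '..' (relative) or an error (absolute).
import Mathlib
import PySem

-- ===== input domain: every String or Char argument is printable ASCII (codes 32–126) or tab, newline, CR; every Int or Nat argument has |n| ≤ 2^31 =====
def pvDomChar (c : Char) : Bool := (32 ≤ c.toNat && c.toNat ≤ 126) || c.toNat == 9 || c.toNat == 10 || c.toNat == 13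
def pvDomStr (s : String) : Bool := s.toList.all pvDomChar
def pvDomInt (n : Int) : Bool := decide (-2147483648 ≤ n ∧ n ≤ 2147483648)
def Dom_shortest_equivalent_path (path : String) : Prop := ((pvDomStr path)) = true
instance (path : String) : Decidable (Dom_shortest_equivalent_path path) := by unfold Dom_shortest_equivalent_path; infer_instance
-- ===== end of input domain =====

-- B replaces A's forward stack (push/pop, '/' sentinel element, final '//'-prefix slice) by a
-- right-to-left scan with a pending-'..' skip counter: real components are dropped while skip>0,
-- kept components are collected back-to-front and reversed once at the end; residual skip becomes
-- leading '..' (relative) or an error (absolute). A raises ValueError on the empty path and on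
-- absolute paths climbing above the root; those inputs are outside Pre_ ("" stands in for the raise).


-- ===== PORT A =====
-- loop body of A: result is the Python list `result`; `none` = ValueError raised
def pvStepA (r : Option (List String)) (token : String) : Option (List String) :=
  match r with
  | none => none
  | some result =>
    if token == ".." then
      if result == [] || result.getLast? == some ".." then some (result ++ [token])
      else if result.getLast? == some "/" then none
      else some result.dropLast
    else some (result ++ [token])

def shortest_equivalent_path (path : String) : String :=
  if path == "" then ""    -- raise ValueError (outside Pre_)
  else
    let start : List String := if PySem.Str.pyGet? path 0 == some '/' then ["/"] else []
    let tokens := ((PySem.Str.split? path "/").getD []).filter (fun t => !(t == "" || t == "."))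
    match tokens.foldl pvStepA (some start) with
    | none => ""           -- raise ValueError (outside Pre_)
    | some result =>
      let fp := PySem.Str.join "/" result
      if PySem.Str.startswith fp "//" then PySem.Str.slice fp (some 1) none else fp

-- ===== PORT B =====
-- loop body of B's right-to-left scan: state = (skip, out); out collects kept components
-- back-to-front and is reversed once at the end
def pvStepR (st : Int × List String) (token : String) : Int × List String :=
  if token == "" || token == "." then st                -- continue
  else if token == ".." then (st.1 + 1, st.2)           -- skip += 1
  else if 0 < st.1 then (st.1 - 1, st.2)                -- drop the component
  else (st.1, st.2 ++ [token])                          -- out.append(token)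

def shortest_equivalent_path_alt (path : String) : String :=
  if path == "" then ""    -- raise ValueError (outside Pre_)
  else
    let isAbs := PySem.Str.startswith path "/"
    let st := (((PySem.Str.split? path "/").getD []).reverse).foldl pvStepR ((0 : Int), ([] : List String))
    let out2 : Option (List String) :=
      if 0 < st.1 then
        (if isAbs then none                              -- raise ValueError (outside Pre_)
         else some (st.2 ++ List.replicate st.1.toNat "..")) -- out.extend(['..'] * skip)
      else some st.2
    match out2 with
    | none => ""
    | some o =>
      let parts := o.reverse                             -- out.reverse()
      if isAbs then "/" ++ PySem.Str.join "/" parts else PySem.Str.join "/" parts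

-- ===== PRECONDITION & SPEC =====
def pvTokens (path : String) : List String :=
  ((PySem.Str.split? path "/").getD []).filter (fun t => !(t == "" || t == "."))

-- Pre_ excludes exactly the inputs where A raises ValueError: the empty path, and absolute
-- paths in which some prefix of the component list has more '..' segments than real ones
-- (climbing above the root).
def Pre_shortest_equivalent_path (path : String) : Prop :=
  path ≠ "" ∧ (PySem.Str.startswith path "/" = true →
    ∀ p ∈ (pvTokens path).inits, 2 * p.count ".." ≤ p.length)
instance (path : String) : Decidable (Pre_shortest_equivalent_path path) := by
  unfold Pre_shortest_equivalent_path; infer_instance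

def pvWitness_shortest_equivalent_path : String := "/a/b/../c"

def Spec_shortest_equivalent_path (path : String) (out : String) : Prop := out = shortest_equivalent_path_alt path
instance (path : String) (out : String) : Decidable (Spec_shortest_equivalent_path path out) := by unfold Spec_shortest_equivalent_path; infer_instance

-- ===== CLAIM (what is proved, stated in full; the proofs are below) =====
def Claim_equal_shortest_equivalent_path : Prop := ∀ (path : String), Dom_shortest_equivalent_path path → Pre_shortest_equivalent_path path → Spec_shortest_equivalent_path path (shortest_equivalent_path path)

-- ===== LEMMAS AND PROOFS =====

-- a stack element as A keeps it (besides '/'): a real path component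
def pvGood (x : String) : Prop := x ≠ ".." ∧ x ≠ "" ∧ '/' ∉ x.toList

lemma pvGood_ne_slash {x : String} (h : pvGood x) : x ≠ "/" := by
  rintro rfl; exact h.2.2 (by decide)

-- the mathematical content of B's right-to-left scan, recursing on the front:
-- pvN ts = (residual '..' count, kept components in back-to-front order)
def pvN : List String → Nat × List String
  | [] => (0, [])
  | t :: ts =>
    if t = ".." then ((pvN ts).1 + 1, (pvN ts).2)
    else if 0 < (pvN ts).1 then ((pvN ts).1 - 1, (pvN ts).2)
    else ((pvN ts).1, (pvN ts).2 ++ [t])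

-- pieces produced by split('/') contain no '/'
lemma pv_go_no_slash : ∀ (fuel : Nat) (l cur : List Char) (acc : List (List Char)),
    l.length < fuel → '/' ∉ cur → (∀ p ∈ acc, '/' ∉ p) →
    ∀ p ∈ PySem.Chars.splitOn.go ['/'] fuel l cur acc, '/' ∉ p := by
  intro fuel
  induction fuel with
  | zero => intro l cur acc h; omega
  | succ n ih =>
    intro l cur acc hlen hcur hacc
    match l with
    | [] =>
      simp only [PySem.Chars.splitOn.go]
      intro p hp
      rcases List.mem_cons.mp (List.mem_reverse.mp hp) with h | h
      · subst h; simpa using hcur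
      · exact hacc _ h
    | c :: rest =>
      simp only [PySem.Chars.splitOn.go]
      by_cases hpre : ['/'].isPrefixOf (c :: rest)
      · simp only [hpre, if_true]
        apply ih
        · simp at hlen ⊢; omega
        · simp
        · intro p hp
          rcases List.mem_cons.mp hp with h | h
          · subst h; simpa using hcur
          · exact hacc _ h
      · simp only [hpre]
        have hc : c ≠ '/' := by
          intro h; exact hpre (by simp [h, List.isPrefixOf])
        apply ih
        · simp at hlen ⊢; omega
        · intro h
          rcases List.mem_cons.mp h with h | h
          · exact hc h.symm
          · exact hcur h
        · exact hacc

lemma pv_split_no_slash (path : String) :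
    ∀ t ∈ (PySem.Str.split? path "/").getD [], '/' ∉ t.toList := by
  intro t ht
  have : (PySem.Str.split? path "/") =
      some ((PySem.Chars.splitOn path.toList ['/']).map String.ofList) := by
    simp [PySem.Str.split?, PySem.Chars.split?]
  rw [this] at ht
  simp only [Option.getD_some, List.mem_map] at ht
  obtain ⟨p, hp, rfl⟩ := ht
  have hnp : '/' ∉ p := by
    have := pv_go_no_slash (path.toList.length + 1) path.toList [] []
      (by omega) (by simp) (by simp)
    exact this p (by simpa [PySem.Chars.splitOn] using hp)
  simpa using hnp

-- tokens of the filtered split are nonempty, not '.', and slash-free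
lemma pv_tokens_good (path : String) :
    ∀ t ∈ pvTokens path, t ≠ "" ∧ t ≠ "." ∧ '/' ∉ t.toList := by
  intro t ht
  rw [pvTokens, List.mem_filter] at ht
  obtain ⟨hmem, hcond⟩ := ht
  simp only [Bool.not_eq_eq_eq_not, Bool.not_true, Bool.or_eq_false_iff, beq_eq_false_iff_ne] at hcond
  exact ⟨hcond.1, hcond.2, pv_split_no_slash path t hmem⟩

-- pvStepR ignores '' and '.' tokens, so folding over a list equals folding over its filter
lemma pv_foldR_filter : ∀ (l : List String) (st : Int × List String),
    l.foldl pvStepR st = (l.filter (fun t => !(t == "" || t == "."))).foldl pvStepR st := by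
  intro l
  induction l with
  | nil => intro st; rfl
  | cons t rest ih =>
    intro st
    by_cases ht : (t == "" || t == ".") = true
    · have hskip : pvStepR st t = st := by simp [pvStepR, ht]
      rw [List.foldl_cons, hskip, ih, List.filter_cons, if_neg (by simp [ht])]
    · rw [List.foldl_cons, ih (pvStepR st t), List.filter_cons,
        if_pos (by simpa using ht), List.foldl_cons]

-- B's reverse fold over good tokens computes pvN
lemma pvN_spec : ∀ (ts : List String),
    (∀ t ∈ ts, t ≠ "" ∧ t ≠ "." ∧ '/' ∉ t.toList) →
    ts.reverse.foldl pvStepR ((0 : Int), ([] : List String)) =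
      (((pvN ts).1 : Int), (pvN ts).2) := by
  intro ts
  induction ts with
  | nil => intro _; rfl
  | cons t rest ih =>
    intro hgood
    have ht := hgood t (by simp)
    have hrest := ih (fun x hx => hgood x (by simp [hx]))
    rw [List.reverse_cons, List.foldl_append, hrest]
    have ht1 : (t == "" || t == ".") = false := by
      simp [ht.1, ht.2.1]
    by_cases hdd : t = ".."
    · subst hdd
      simp [pvStepR, pvN]
    · have ht2 : (t == "..") = false := by simpa using hdd
      by_cases hu : 0 < (pvN rest).1
      · have hI : (0 : Int) < ((pvN rest).1 : Int) := by exact_mod_cast hu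
        have hcast : ((pvN rest).1 : Int) - 1 = (((pvN rest).1 - 1 : Nat) : Int) := by omega
        simp only [pvStepR, List.foldl_cons, List.foldl_nil, ht1, ht2, hI, if_true,
          Bool.false_eq_true, if_false, pvN, hu, if_neg hdd, hcast]
      · have h0 : (pvN rest).1 = 0 := by omega
        have hI : ¬ ((0 : Int) < ((pvN rest).1 : Int)) := by simp [h0]
        simp [pvStepR, ht1, ht2, pvN, hu, hdd]

-- components kept by the reverse scan are good tokens
lemma pvN_good : ∀ (ts : List String),
    (∀ t ∈ ts, t ≠ "" ∧ t ≠ "." ∧ '/' ∉ t.toList) →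
    ∀ x ∈ (pvN ts).2, pvGood x := by
  intro ts
  induction ts with
  | nil => intro _ x hx; simp [pvN] at hx
  | cons t rest ih =>
    intro hgood x hx
    have hrest := ih (fun y hy => hgood y (by simp [hy]))
    by_cases hdd : t = ".."
    · subst hdd; simp only [pvN, reduceIte] at hx; exact hrest x hx
    · by_cases hu : 0 < (pvN rest).1
      · simp only [pvN, if_neg hdd, hu, if_true] at hx
        exact hrest x hx
      · simp only [pvN, if_neg hdd, if_neg hu] at hx
        rcases List.mem_append.mp hx with h | h
        · exact hrest x h
        · simp at h; subst h
          have := hgood x (by simp)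
          exact ⟨hdd, this.1, this.2.2⟩

-- the prefix-balance condition bounds the residual '..' count of the reverse scan
lemma pvN_le : ∀ (ts : List String) (k : Nat),
    (∀ p, p <+: ts → 2 * p.count ".." ≤ p.length + k) → (pvN ts).1 ≤ k := by
  intro ts
  induction ts with
  | nil => intro k _; simp [pvN]
  | cons t rest ih =>
    intro k H
    by_cases hdd : t = ".."
    · subst hdd
      have hk : 1 ≤ k := by
        have := H [".."] ⟨rest, rfl⟩
        simp at this; omega
      have hrec : (pvN rest).1 ≤ k - 1 := by
        apply ih
        intro p hp
        have := H (".." :: p) (List.cons_prefix_cons.mpr ⟨rfl, hp⟩)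
        simp at this ⊢
        omega
      simp only [pvN, reduceIte]
      omega
    · have hrec : (pvN rest).1 ≤ k + 1 := by
        apply ih
        intro p hp
        have := H (t :: p) (List.cons_prefix_cons.mpr ⟨rfl, hp⟩)
        have hc : (t :: p).count ".." = p.count ".." := by
          simp [hdd]
        rw [hc] at this
        simp at this ⊢
        omega
      by_cases hu : 0 < (pvN rest).1
      · simp only [pvN, if_neg hdd, hu, if_true]; omega
      · simp only [pvN, if_neg hdd, if_neg hu]; omega

lemma pv_foldA_none : ∀ (ts : List String), ts.foldl pvStepA none = none := by
  intro ts
  induction ts with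
  | nil => rfl
  | cons t rest ih => rw [List.foldl_cons]; exact ih

-- A's absolute loop computes the reverse-scan normal form
lemma pvA_abs : ∀ (ts : List String) (S : List String),
    (∀ t ∈ ts, t ≠ "" ∧ t ≠ "." ∧ '/' ∉ t.toList) →
    (∀ x ∈ S, pvGood x) →
    ts.foldl pvStepA (some ("/" :: S)) =
      if (pvN ts).1 ≤ S.length
      then some ("/" :: (S.take (S.length - (pvN ts).1) ++ (pvN ts).2.reverse))
      else none := by
  intro ts
  induction ts with
  | nil => intro S _ _; simp [pvN]
  | cons t rest ih =>
    intro S hts hS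
    have ht := hts t (by simp)
    have hrest : ∀ t ∈ rest, t ≠ "" ∧ t ≠ "." ∧ '/' ∉ t.toList :=
      fun x hx => hts x (by simp [hx])
    by_cases hdd : t = ".."
    · subst hdd
      rcases S.eq_nil_or_concat with rfl | ⟨ys, y, rfl⟩
      · -- empty stack: A hits the '/' sentinel and raises
        have hA : pvStepA (some ["/"]) ".." = none := by decide
        rw [List.foldl_cons, hA, pv_foldA_none]
        have : ¬ ((pvN (".." :: rest)).1 ≤ ([] : List String).length) := by
          simp [pvN]
        rw [if_neg this]
      · simp only [List.concat_eq_append] at hS ⊢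
        have hy : pvGood y := hS y (by simp)
        have hA : pvStepA (some ("/" :: (ys ++ [y]))) ".." = some ("/" :: ys) := by
          have h1 : ("/" :: (ys ++ [y])).getLast? = some y := by
            rw [show "/" :: (ys ++ [y]) = ("/" :: ys) ++ [y] by simp]
            exact List.getLast?_concat
          have h2 : ("/" :: (ys ++ [y])).dropLast = "/" :: ys := by
            rw [show "/" :: (ys ++ [y]) = ("/" :: ys) ++ [y] by simp]
            exact List.dropLast_concat
          simp [pvStepA, h1, h2, hy.1, pvGood_ne_slash hy]
        rw [List.foldl_cons, hA, ih ys hrest (fun x hx => hS x (by simp [hx]))]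
        simp only [pvN, reduceIte]
        by_cases hle : (pvN rest).1 ≤ ys.length
        · rw [if_pos hle, if_pos (by simp only [List.length_append, List.length_cons, List.length_nil]; omega)]
          have htk : (ys ++ [y]).take ((ys ++ [y]).length - ((pvN rest).1 + 1)) =
              ys.take (ys.length - (pvN rest).1) := by
            rw [List.take_append_of_le_length (by simp only [List.length_append, List.length_cons, List.length_nil]; omega)]
            congr 1
            simp only [List.length_append, List.length_cons, List.length_nil]
            omega
          rw [htk]
        · rw [if_neg hle, if_neg (by simp only [List.length_append, List.length_cons, List.length_nil]; omega)]
    · have hA : pvStepA (some ("/" :: S)) t = some ("/" :: (S ++ [t])) := by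
        simp [pvStepA, hdd]
      have hSt : ∀ x ∈ S ++ [t], pvGood x := by
        intro x hx
        rcases List.mem_append.mp hx with h | h
        · exact hS x h
        · simp at h; subst h; exact ⟨hdd, ht.1, ht.2.2⟩
      rw [List.foldl_cons, hA, ih (S ++ [t]) hrest hSt]
      by_cases hu : 0 < (pvN rest).1
      · simp only [pvN, if_neg hdd, hu, if_true]
        by_cases hle : (pvN rest).1 ≤ (S ++ [t]).length
        · rw [if_pos hle, if_pos (by simp only [List.length_append, List.length_cons, List.length_nil] at hle ⊢; omega)]
          have htk : (S ++ [t]).take ((S ++ [t]).length - (pvN rest).1) =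
              S.take (S.length - ((pvN rest).1 - 1)) := by
            rw [List.take_append_of_le_length (by simp only [List.length_append, List.length_cons, List.length_nil]; omega)]
            congr 1
            simp only [List.length_append, List.length_cons, List.length_nil]
            omega
          rw [htk]
        · rw [if_neg hle, if_neg (by simp only [List.length_append, List.length_cons, List.length_nil] at hle ⊢; omega)]
      · have h0 : (pvN rest).1 = 0 := by omega
        simp only [pvN, if_neg hdd, if_neg hu]
        rw [if_pos (by simp [h0]), if_pos (by simp [h0])]
        simp [h0]
        rw [List.take_of_length_le (by simp)]
        simp

-- A's relative loop computes the reverse-scan normal form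
lemma pvA_rel : ∀ (ts : List String) (up : Nat) (S : List String),
    (∀ t ∈ ts, t ≠ "" ∧ t ≠ "." ∧ '/' ∉ t.toList) →
    (∀ x ∈ S, pvGood x) →
    ts.foldl pvStepA (some (List.replicate up ".." ++ S)) =
      some (if (pvN ts).1 ≤ S.length
        then List.replicate up ".." ++ (S.take (S.length - (pvN ts).1) ++ (pvN ts).2.reverse)
        else List.replicate (up + (pvN ts).1 - S.length) ".." ++ (pvN ts).2.reverse) := by
  intro ts
  induction ts with
  | nil => intro up S _ _; simp [pvN]
  | cons t rest ih =>
    intro up S hts hS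
    have ht := hts t (by simp)
    have hrest : ∀ t ∈ rest, t ≠ "" ∧ t ≠ "." ∧ '/' ∉ t.toList :=
      fun x hx => hts x (by simp [hx])
    by_cases hdd : t = ".."
    · subst hdd
      rcases S.eq_nil_or_concat with rfl | ⟨ys, y, rfl⟩
      · have hA : pvStepA (some (List.replicate up ".." ++ [])) ".." =
            some (List.replicate (up + 1) ".." ++ []) := by
          cases up with
          | zero => simp [pvStepA]
          | succ n =>
            have hlast : (List.replicate (n + 1) (".." : String)).getLast? = some ".." := by
              simp [List.getLast?_replicate]
            simp [pvStepA, hlast, ← List.replicate_succ']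
        rw [List.foldl_cons, hA, ih (up + 1) [] hrest (by simp)]
        simp only [pvN, reduceIte, List.length_nil]
        by_cases hu0 : (pvN rest).1 = 0
        · rw [if_pos (by omega), if_neg (by omega)]
          simp [hu0]
        · rw [if_neg (by omega), if_neg (by omega)]
          congr 3
          omega
      · simp only [List.concat_eq_append] at hS ⊢
        have hy : pvGood y := hS y (by simp)
        have hA : pvStepA (some (List.replicate up ".." ++ (ys ++ [y]))) ".." =
            some (List.replicate up ".." ++ ys) := by
          have h1 : (List.replicate up ".." ++ (ys ++ [y])).getLast? = some y := by
            rw [show List.replicate up ".." ++ (ys ++ [y]) =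
                (List.replicate up ".." ++ ys) ++ [y] by simp]
            exact List.getLast?_concat
          have h2 : (List.replicate up ".." ++ (ys ++ [y])).dropLast =
              List.replicate up ".." ++ ys := by
            rw [show List.replicate up ".." ++ (ys ++ [y]) =
                (List.replicate up ".." ++ ys) ++ [y] by simp]
            exact List.dropLast_concat
          have hne : List.replicate up ".." ++ (ys ++ [y]) ≠ [] := by simp
          simp [pvStepA, h1, h2, hy.1, pvGood_ne_slash hy, hne]
        rw [List.foldl_cons, hA, ih up ys hrest (fun x hx => hS x (by simp [hx]))]
        simp only [pvN, reduceIte]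
        by_cases hle : (pvN rest).1 ≤ ys.length
        · rw [if_pos hle, if_pos (by simp only [List.length_append, List.length_cons, List.length_nil]; omega)]
          have htk : (ys ++ [y]).take ((ys ++ [y]).length - ((pvN rest).1 + 1)) =
              ys.take (ys.length - (pvN rest).1) := by
            rw [List.take_append_of_le_length (by simp only [List.length_append, List.length_cons, List.length_nil]; omega)]
            congr 1
            simp only [List.length_append, List.length_cons, List.length_nil]
            omega
          rw [htk]
        · rw [if_neg hle, if_neg (by simp only [List.length_append, List.length_cons, List.length_nil]; omega)]
          congr 3
          simp only [List.length_append, List.length_cons, List.length_nil]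
          omega
    · have hA : pvStepA (some (List.replicate up ".." ++ S)) t =
          some (List.replicate up ".." ++ (S ++ [t])) := by
        simp [pvStepA, hdd]
      have hSt : ∀ x ∈ S ++ [t], pvGood x := by
        intro x hx
        rcases List.mem_append.mp hx with h | h
        · exact hS x h
        · simp at h; subst h; exact ⟨hdd, ht.1, ht.2.2⟩
      rw [List.foldl_cons, hA, ih up (S ++ [t]) hrest hSt]
      by_cases hu : 0 < (pvN rest).1
      · simp only [pvN, if_neg hdd, hu, if_true]
        by_cases hle : (pvN rest).1 ≤ (S ++ [t]).length
        · rw [if_pos hle, if_pos (by simp only [List.length_append, List.length_cons, List.length_nil] at hle ⊢; omega)]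
          have htk : (S ++ [t]).take ((S ++ [t]).length - (pvN rest).1) =
              S.take (S.length - ((pvN rest).1 - 1)) := by
            rw [List.take_append_of_le_length (by simp only [List.length_append, List.length_cons, List.length_nil]; omega)]
            congr 1
            simp only [List.length_append, List.length_cons, List.length_nil]
            omega
          rw [htk]
        · rw [if_neg hle, if_neg (by simp only [List.length_append, List.length_cons, List.length_nil] at hle ⊢; omega)]
          congr 3
          simp only [List.length_append, List.length_cons, List.length_nil]
          omega
      · have h0 : (pvN rest).1 = 0 := by omega
        simp only [pvN, if_neg hdd, if_neg hu]
        rw [if_pos (by simp [h0]), if_pos (by simp [h0])]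
        simp [h0]
        rw [List.take_of_length_le (by simp)]
        simp

-- A's final join+slice on '/' :: stack equals '/' ++ join stack
lemma pv_join_abs (st : List String) (h : ∀ x ∈ st, pvGood x) :
    (if PySem.Str.startswith (PySem.Str.join "/" ("/" :: st)) "//" then
        PySem.Str.slice (PySem.Str.join "/" ("/" :: st)) (some 1) none
      else PySem.Str.join "/" ("/" :: st)) = "/" ++ PySem.Str.join "/" st := by
  cases st with
  | nil => decide
  | cons z zs =>
    have hfp : (PySem.Str.join "/" ("/" :: z :: zs)).toList =
        '/' :: '/' :: PySem.Chars.join ['/'] (z.toList :: zs.map String.toList) := by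
      simp [PySem.Str.join, PySem.Chars.join_cons_cons]
    have hsw : PySem.Str.startswith (PySem.Str.join "/" ("/" :: z :: zs)) "//" = true := by
      simp only [PySem.Str.startswith]
      rw [hfp]
      rw [PySem.Chars.startswith_iff]
      exact ⟨PySem.Chars.join ['/'] (z.toList :: zs.map String.toList), by simp⟩
    rw [hsw, if_pos rfl]
    apply String.toList_inj.mp
    simp only [PySem.Str.slice, String.toList_ofList, PySem.Chars.slice_eq_listSlice]
    rw [hfp, PySem.List.slice_from _ (by norm_num)]
    simp [PySem.Str.join, PySem.Chars.join]

-- a join of nonempty slash-free components never starts with '//'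
lemma pv_join_rel (parts : List String) (h : ∀ x ∈ parts, x ≠ "" ∧ '/' ∉ x.toList) :
    PySem.Str.startswith (PySem.Str.join "/" parts) "//" = false := by
  cases parts with
  | nil => decide
  | cons p rest =>
    have hp := h p (by simp)
    obtain ⟨c, cs, hc⟩ : ∃ c cs, p.toList = c :: cs := by
      cases hcl : p.toList with
      | nil => exact absurd (by simpa using congrArg String.ofList hcl) hp.1
      | cons c cs => exact ⟨c, cs, rfl⟩
    have hcne : c ≠ '/' := by
      intro h'; subst h'; exact hp.2 (by rw [hc]; simp)
    have hjoin : ∃ X, (PySem.Str.join "/" (p :: rest)).toList = p.toList ++ X := by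
      cases rest with
      | nil => exact ⟨[], by simp [PySem.Str.join, PySem.Chars.join_singleton]⟩
      | cons q qs =>
        exact ⟨'/' :: PySem.Chars.join ['/'] (q.toList :: qs.map String.toList),
          by simp [PySem.Str.join, PySem.Chars.join_cons_cons]⟩
    obtain ⟨X, hX⟩ := hjoin
    simp only [PySem.Str.startswith]
    rw [hX, hc]
    rw [Bool.eq_false_iff]
    intro hsw
    obtain ⟨t, ht⟩ := PySem.Chars.startswith_iff _ _ |>.mp hsw
    rw [show ("//" : String).toList = ['/', '/'] by decide] at ht
    have hhead : '/' = c := by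
      have := congrArg (fun l => l.head?) ht
      simpa using this
    exact hcne hhead.symm

-- path[0] == '/' agrees with path.startswith('/') on a nonempty path
lemma pv_first_char (path : String) (h : path ≠ "") :
    (PySem.Str.pyGet? path 0 == some '/') = PySem.Str.startswith path "/" := by
  obtain ⟨c, cs, hc⟩ : ∃ c cs, path.toList = c :: cs := by
    cases hcl : path.toList with
    | nil => exact absurd (by simpa using congrArg String.ofList hcl) h
    | cons c cs => exact ⟨c, cs, rfl⟩
  simp only [PySem.Str.pyGet?, PySem.Str.startswith, hc]
  rw [show ("/" : String).toList = ['/'] by decide]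
  by_cases hcs : c = '/'
  · subst hcs
    simp [PySem.Chars.pyGet?_eq_listPyGet?, PySem.Chars.startswith]
  · simp [PySem.Chars.pyGet?_eq_listPyGet?, PySem.Chars.startswith,
      List.isPrefixOf, hcs]
    exact fun h' => hcs h'.symm

-- ===== VERDICT (by name: the statement is the Claim_ definition above) =====
theorem shortest_equivalent_path_spec : Claim_equal_shortest_equivalent_path := by
  intro path _ hPre
  obtain ⟨hne, hbal⟩ := hPre
  have hne' : (path == "") = false := by simpa using hne
  unfold Spec_shortest_equivalent_path shortest_equivalent_path shortest_equivalent_path_alt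
  simp only [hne', Bool.false_eq_true, if_false]
  set ts : List String :=
    ((PySem.Str.split? path "/").getD []).filter (fun t => !(t == "" || t == ".")) with hts
  have htok : ∀ t ∈ ts, t ≠ "" ∧ t ≠ "." ∧ '/' ∉ t.toList := pv_tokens_good path
  have hgoodc : ∀ x ∈ (pvN ts).2, pvGood x := pvN_good ts htok
  have hfoldB :
      (((PySem.Str.split? path "/").getD []).reverse).foldl pvStepR ((0 : Int), ([] : List String)) =
        (((pvN ts).1 : Int), (pvN ts).2) := by
    rw [pv_foldR_filter, List.filter_reverse]
    exact pvN_spec _ htok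
  rw [hfoldB]
  simp only [pv_first_char path hne]
  by_cases habs : PySem.Str.startswith path "/" = true
  · have hu0 : (pvN ts).1 = 0 := by
      have h := pvN_le ts 0 (fun p hp => by
        simpa using hbal habs p ((List.mem_inits _ _).mpr hp))
      omega
    have hA := pvA_abs ts [] htok (by simp)
    rw [hu0] at hA
    simp only [List.length_nil, le_refl, if_pos, Nat.sub_zero, List.take_nil,
      List.nil_append] at hA
    rw [habs]
    simp only [reduceIte, hA, hu0, Nat.cast_zero, lt_self_iff_false, if_false]
    exact pv_join_abs _ (fun x hx => hgoodc x (List.mem_reverse.mp hx))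
  · have habs' : PySem.Str.startswith path "/" = false := Bool.not_eq_true _ |>.mp habs
    have hA := pvA_rel ts 0 [] htok (by simp)
    simp only [List.replicate_zero, List.nil_append, List.length_nil] at hA
    rw [habs']
    simp only [Bool.false_eq_true, if_false]
    rw [hA]
    set u := (pvN ts).1 with hu
    set c := (pvN ts).2 with hc
    have hparts : ∀ x ∈ List.replicate u ".." ++ c.reverse, x ≠ "" ∧ '/' ∉ x.toList := by
      intro x hx
      rcases List.mem_append.mp hx with h | h
      · have := List.eq_of_mem_replicate h; subst this; exact ⟨by decide, by decide⟩
      · have := hgoodc x (List.mem_reverse.mp h)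
        exact ⟨this.2.1, this.2.2⟩
    by_cases hu0 : u = 0
    · rw [if_pos (by omega)]
      have hnsw := pv_join_rel c.reverse (fun x hx => hparts x (by simp [hx]))
      simp only [hu0, Nat.sub_zero, List.take_nil, List.nil_append, Nat.cast_zero,
        lt_self_iff_false, if_false, hnsw, Bool.false_eq_true]
    · rw [if_neg (by omega)]
      rw [if_pos (by exact_mod_cast Nat.pos_of_ne_zero hu0)]
      have hrev : (c ++ List.replicate (((u : Nat) : Int)).toNat "..").reverse =
          List.replicate (0 + u - 0) ".." ++ c.reverse := by
        rw [List.reverse_append, List.reverse_replicate, Int.toNat_natCast]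
        congr 2
        omega
      have hnsw := pv_join_rel (List.replicate (0 + u - 0) ".." ++ c.reverse) (by
        intro x hx
        apply hparts
        rcases List.mem_append.mp hx with h | h
        · have := List.eq_of_mem_replicate h; subst this
          exact List.mem_append.mpr (Or.inl (List.mem_replicate.mpr ⟨hu0, rfl⟩))
        · exact List.mem_append.mpr (Or.inr h))
      simp only [hrev, hnsw, Bool.false_eq_true, if_false]
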